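-- pv_equiv track=rewrite | github.com/Rotz360/Travel-Guide-App | backend/services/itinerary_service.py | calculate_days_per_destination
-- ===== SOURCE A (Python) =====
-- from typing import List, Dict, Optional
--
-- def calculate_days_per_destination(
--     destinations: List[str],
--     total_days: int
-- ) -> Dict[str, int]:
--     """
--     Distribute days across destinations
--
--     Args:
--         destinations: List of destination names
--         total_days: Total trip duration in days
--
--     Returns:
--         Dict mapping destination to number of days
--     """
--     num_destinations = len(destinations)
--
--     if num_destinations == 0:
--         return {}
--
--     # Base allocation
--     days_per_dest = total_days // num_destinations
--     extra_days = total_days % num_destinations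
--
--     allocation = {}
--     for i, dest in enumerate(destinations):
--         # Give extra days to first destinations
--         allocation[dest] = days_per_dest + (1 if i < extra_days else 0)
--
--     return allocation
-- ===== SOURCE B (Python) =====
-- def calculate_days_per_destination(destinations, total_days):
--     """Distribute days across destinations: running-remainder greedy.
--
--     Each destination in turn gets the ceiling of remaining_days / remaining_count,
--     which yields the same 'extra days to the first destinations' split without
--     ever computing the base quotient or the remainder explicitly.
--     """
--     if not destinations:
--         return {}
--     allocation = {}
--     remaining = total_days
--     remaining_count = len(destinations)
--     for dest in destinations:
--         share = -(-remaining // remaining_count)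
--         allocation[dest] = share
--         remaining -= share
--         remaining_count -= 1
--     return allocation
-- ===== Notes on version B (the rewrite author's own statement) =====
-- stated objective: alternative
-- what changed: Replaced the precomputed quotient/remainder + indexed comparison (i < extra_days) with a running-remainder greedy loop: each destination gets ceil(remaining/remaining_count), with remaining and remaining_count updated as the loop goes.
import Mathlib
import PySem

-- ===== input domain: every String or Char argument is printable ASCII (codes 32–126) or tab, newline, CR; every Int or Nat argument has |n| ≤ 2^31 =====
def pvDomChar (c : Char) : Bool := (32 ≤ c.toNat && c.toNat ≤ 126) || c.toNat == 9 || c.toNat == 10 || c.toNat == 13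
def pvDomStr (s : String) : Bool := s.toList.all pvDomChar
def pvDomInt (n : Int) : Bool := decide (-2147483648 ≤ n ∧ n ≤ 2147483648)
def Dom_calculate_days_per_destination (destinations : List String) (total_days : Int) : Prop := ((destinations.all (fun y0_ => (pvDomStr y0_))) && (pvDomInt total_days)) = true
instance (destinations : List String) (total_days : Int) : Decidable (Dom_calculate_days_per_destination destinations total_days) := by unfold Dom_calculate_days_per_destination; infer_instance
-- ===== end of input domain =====

-- B replaces the precomputed quotient/remainder split with a running-remainder greedy
-- (each destination gets ceil(remaining/remaining_count)); equal return value, no speed claim.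

-- ===== PORT A =====
-- literal port of A: q = total // n, e = total % n, dict insert q + (1 if i < e else 0)
def calculate_days_per_destination (destinations : List String) (total_days : Int) : List (String × Int) :=
  let num_destinations : Int := destinations.length
  if num_destinations = 0 then []
  else
    let days_per_dest := PySem.Int.floordiv total_days num_destinations
    let extra_days := PySem.Int.mod total_days num_destinations
    let allocation :=
      (PySem.List.enumerate destinations).foldl
        (fun (acc : PySem.Dict String Int) p =>
          acc.insert p.2 (days_per_dest + (if p.1 < extra_days then 1 else 0)))
        PySem.Dict.empty
    allocation.items

-- ===== PORT B =====
-- the loop body of B: share = -(-remaining // remaining_count); update dict, remaining, count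
def pvAltLoop (dests : List String) (remaining : Int) (cnt : Int)
    (allocation : PySem.Dict String Int) : PySem.Dict String Int :=
  match dests with
  | [] => allocation
  | dest :: rest =>
    let share := -(PySem.Int.floordiv (-remaining) cnt)
    pvAltLoop rest (remaining - share) (cnt - 1) (allocation.insert dest share)

def calculate_days_per_destination_alt (destinations : List String) (total_days : Int) : List (String × Int) :=
  if destinations = [] then []
  else (pvAltLoop destinations total_days (destinations.length : Int) PySem.Dict.empty).items

-- ===== PRECONDITION & SPEC =====
def Spec_calculate_days_per_destination (destinations : List String) (total_days : Int) (out : List (String × Int)) : Prop := out = calculate_days_per_destination_alt destinations total_days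
instance (destinations : List String) (total_days : Int) (out : List (String × Int)) : Decidable (Spec_calculate_days_per_destination destinations total_days out) := by unfold Spec_calculate_days_per_destination; infer_instance

-- ===== CLAIM (what is proved, stated in full; the proofs are below) =====
def Claim_equal_calculate_days_per_destination : Prop := ∀ (destinations : List String) (total_days : Int), Dom_calculate_days_per_destination destinations total_days → Spec_calculate_days_per_destination destinations total_days (calculate_days_per_destination destinations total_days)

-- ===== LEMMAS AND PROOFS =====

-- the common shape both loops produce: the (dest, value) pairs, with e counting
-- how many leading destinations still get an extra day
def pvPairs (l : List String) (q e : Int) : List (String × Int) :=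
  match l with
  | [] => []
  | d :: t =>
    (d, q + (if 0 < e then 1 else 0)) :: pvPairs t q (if 0 < e then e - 1 else e)

-- pvPairs ignores the exact value of a non-positive extra-day count
theorem pvPairs_nonpos (t : List String) (q : Int) :
    ∀ e e' : Int, e ≤ 0 → e' ≤ 0 → pvPairs t q e = pvPairs t q e' := by
  induction t with
  | nil => intro e e' _ _; rfl
  | cons d t ih =>
    intro e e' he he'
    simp only [pvPairs, if_neg (by omega : ¬ 0 < e), if_neg (by omega : ¬ 0 < e')]
    rw [ih e e' he he']

-- A's enumerate fold equals the insert-fold over pvPairs (c = threshold, s = start index)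
theorem pvA_eq_pairs (l : List String) (q : Int) : ∀ (c s : Int)
    (acc : PySem.Dict String Int),
    (PySem.List.enumerate l s).foldl
        (fun (acc : PySem.Dict String Int) p =>
          acc.insert p.2 (q + (if p.1 < c then 1 else 0))) acc
    = (pvPairs l q (c - s)).foldl (fun (acc : PySem.Dict String Int) p =>
        acc.insert p.1 p.2) acc := by
  induction l with
  | nil => intro c s acc; simp [PySem.List.enumerate_nil, pvPairs]
  | cons d t ih =>
    intro c s acc
    rw [PySem.List.enumerate_cons]
    simp only [List.foldl_cons, pvPairs]
    by_cases hcs : s < c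
    · rw [if_pos hcs, if_pos (by omega : (0:Int) < c - s)]
      rw [show (if 0 < c - s then c - s - 1 else c - s) = c - (s + 1) by
        rw [if_pos (by omega : (0:Int) < c - s)]; ring]
      exact ih c (s + 1) (acc.insert d (q + 1))
    · rw [if_neg hcs, if_neg (by omega : ¬ (0:Int) < c - s)]
      rw [show (if 0 < c - s then c - s - 1 else c - s) = c - s by
        rw [if_neg (by omega : ¬ (0:Int) < c - s)]]
      rw [pvPairs_nonpos t q (c - s) (c - (s + 1)) (by omega) (by omega)]
      exact ih c (s + 1) (acc.insert d (q + 0))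

-- ceiling division step: for 0 < m and 0 ≤ e ≤ m, ceil((q*m+e)/m) = q + [0 < e]
theorem pvCeil_step (q e m : Int) (hm : 0 < m) (he0 : 0 ≤ e) (hem : e ≤ m) :
    -(PySem.Int.floordiv (-(q * m + e)) m) = q + (if 0 < e then 1 else 0) := by
  rw [PySem.Int.neg_floordiv_neg_eq_iff_of_pos hm]
  by_cases he : 0 < e
  · rw [if_pos he]; constructor <;> nlinarith
  · rw [if_neg he]; constructor <;> nlinarith

-- B's greedy loop equals the insert-fold over pvPairs, given remaining = q*|l| + e
theorem pvB_eq_pairs (l : List String) : ∀ (q e : Int),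
    0 ≤ e → e ≤ (l.length : Int) → ∀ (acc : PySem.Dict String Int),
    pvAltLoop l (q * (l.length : Int) + e) (l.length : Int) acc
    = (pvPairs l q e).foldl (fun (acc : PySem.Dict String Int) p =>
        acc.insert p.1 p.2) acc := by
  induction l with
  | nil => intro q e _ _ acc; simp [pvAltLoop, pvPairs]
  | cons d t ih =>
    intro q e he0 hel acc
    have hm : 0 < ((d :: t).length : Int) := by simp only [List.length_cons]; push_cast; omega
    rw [pvAltLoop]
    simp only [pvPairs, List.foldl_cons]
    rw [pvCeil_step q e _ hm he0 hel]
    have hlen : ((d :: t).length : Int) - 1 = (t.length : Int) := by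
      simp only [List.length_cons]; push_cast; ring
    by_cases he : 0 < e
    · simp only [if_pos he]
      rw [show q * ((d :: t).length : Int) + e - (q + 1) = q * (t.length : Int) + (e - 1) by
          simp only [List.length_cons]; push_cast; ring,
        hlen]
      exact ih q (e - 1) (by omega) (by simp only [List.length_cons] at hel; push_cast at hel ⊢; omega) (acc.insert d (q + 1))
    · simp only [if_neg he, add_zero]
      rw [show q * ((d :: t).length : Int) + e - q = q * (t.length : Int) + e by
          simp only [List.length_cons]; push_cast; ring,
        hlen]
      exact ih q e he0 (by omega) (acc.insert d q)

-- ===== VERDICT (by name: the statement is the Claim_ definition above) =====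
theorem calculate_days_per_destination_spec : Claim_equal_calculate_days_per_destination := by
  intro destinations total_days _
  unfold Spec_calculate_days_per_destination
  cases destinations with
  | nil => rfl
  | cons d t =>
    simp only [calculate_days_per_destination, calculate_days_per_destination_alt]
    have hn : ¬ (((d :: t).length : Int) = 0) := by
      simp only [List.length_cons]; push_cast; omega
    rw [if_neg hn, if_neg (by simp : ¬ (d :: t) = ([] : List String))]
    congr 1
    have hm : 0 < ((d :: t).length : Int) := by
      simp only [List.length_cons]; push_cast; omega
    set q := PySem.Int.floordiv total_days ((d :: t).length : Int) with hq
    set e := PySem.Int.mod total_days ((d :: t).length : Int) with he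
    have hsum : q * ((d :: t).length : Int) + e = total_days :=
      PySem.Int.floordiv_mul_add_mod total_days ((d :: t).length : Int)
    have he0 : 0 ≤ e := PySem.Int.mod_nonneg total_days hm
    have helt : e < ((d :: t).length : Int) := PySem.Int.mod_lt total_days hm
    calc (PySem.List.enumerate (d :: t)).foldl
          (fun (acc : PySem.Dict String Int) p =>
            acc.insert p.2 (q + (if p.1 < e then 1 else 0))) PySem.Dict.empty
        = (pvPairs (d :: t) q e).foldl
            (fun (acc : PySem.Dict String Int) p => acc.insert p.1 p.2) PySem.Dict.empty := by
          simpa using pvA_eq_pairs (d :: t) q e 0 PySem.Dict.empty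
      _ = pvAltLoop (d :: t) total_days (((d :: t).length : Int)) PySem.Dict.empty := by
          rw [← hsum]
          exact (pvB_eq_pairs (d :: t) q e he0 (le_of_lt helt) PySem.Dict.empty).symm
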